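-- pv_equiv track=rewrite | github.com/ASSERT-KTH/Mokav | experiments/pynguin/c4b/return-lst/generated_tests/src_2315/8/src_2315.py | func
-- ===== SOURCE A (Python) =====
-- def func(*args):
-- 	ret_values = []
--
--
-- 	def render(input):
-- 	    ret = input.lower()
-- 	    for vowel in 'aeiouy':
-- 	        ret = ret.replace(vowel, '')
-- 	    ret = map((lambda c: ('.' + c)), ret)
-- 	    return ''.join(ret)
--
-- 	def main():
-- 	    ret_values.append(render(args[0]))
-- 	main()
--
-- 	return ret_values
-- ===== SOURCE B (Python) =====
-- def func(*args):
--     s = args[0].lower()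
--     return [''.join('.' + c for c in s if c not in 'aeiouy')]
-- ===== Notes on version B (the rewrite author's own statement) =====
-- stated objective: simpler
-- what changed: Replaces six sequential str.replace scans plus a separate map pass with one filtered single-pass comprehension testing vowel membership per character.
import Mathlib
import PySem

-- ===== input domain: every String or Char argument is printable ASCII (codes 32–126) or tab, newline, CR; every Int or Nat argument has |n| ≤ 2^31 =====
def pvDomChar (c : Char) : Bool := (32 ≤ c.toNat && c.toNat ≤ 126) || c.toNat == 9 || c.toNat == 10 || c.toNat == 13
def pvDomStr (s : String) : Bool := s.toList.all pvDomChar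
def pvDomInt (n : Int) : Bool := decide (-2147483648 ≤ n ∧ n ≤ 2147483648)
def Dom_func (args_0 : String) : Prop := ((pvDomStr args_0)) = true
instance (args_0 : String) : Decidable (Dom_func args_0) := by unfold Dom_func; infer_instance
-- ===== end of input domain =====

-- B replaces A's six sequential str.replace scans (then a map pass) with one
-- single-pass filtered comprehension over the lowered string; same return value.

-- ===== PORT A =====
-- render: lower, then a loop over 'aeiouy' doing ret = ret.replace(vowel, ''),
-- then map (lambda c: '.' + c) joined by ''.
def func (args_0 : String) : List String :=
  let ret0 := PySem.Str.lower args_0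
  let ret1 := ("aeiouy".toList).foldl
    (fun ret vowel => PySem.Str.replace ret (String.ofList [vowel]) "") ret0
  let mapped := ret1.toList.map (fun c => String.ofList ['.', c])
  [PySem.Str.join "" mapped]

-- ===== PORT B =====
-- s = args[0].lower(); ''.join('.' + c for c in s if c not in 'aeiouy')
def func_alt (args_0 : String) : List String :=
  let s := PySem.Str.lower args_0
  [PySem.Str.join ""
    ((s.toList.filter (fun c => !("aeiouy".toList.contains c))).map
      (fun c => String.ofList ['.', c]))]

-- ===== PRECONDITION & SPEC =====
def Spec_func (args_0 : String) (out : List String) : Prop := out = func_alt args_0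
instance (args_0 : String) (out : List String) : Decidable (Spec_func args_0 out) := by unfold Spec_func; infer_instance

-- ===== CLAIM (what is proved, stated in full; the proofs are below) =====
def Claim_equal_func : Prop := ∀ (args_0 : String), Dom_func args_0 → Spec_func args_0 (func args_0)

-- ===== LEMMAS AND PROOFS =====

-- ===== VERDICT (by name: the statement is the Claim_ definition above) =====
-- replace.go with a single-char pattern and empty replacement is a filter
theorem go_single (v : Char) : ∀ (fuel : Nat) (l acc : List Char), l.length ≤ fuel →
    PySem.Chars.replace.go [v] [] fuel l acc = acc.reverse ++ l.filter (· != v) := by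
  intro fuel
  induction fuel with
  | zero => intro l acc h; simp at h; simp [h, PySem.Chars.replace.go]
  | succ n ih =>
    intro l acc h
    cases l with
    | nil => simp [PySem.Chars.replace.go]
    | cons c t =>
      by_cases hc : v = c
      · subst hc
        simp only [PySem.Chars.replace.go, List.isPrefixOf, BEq.rfl, Bool.true_and,
          if_pos, List.reverse_nil, List.nil_append]
        rw [show List.drop [v].length (v :: t) = t from rfl,
          ih t acc (by simpa using Nat.le_of_succ_le_succ h)]
        simp
      · have hb : ([v].isPrefixOf (c :: t)) = false := by
          simp [List.isPrefixOf, hc]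
        simp only [PySem.Chars.replace.go, hb, Bool.false_eq_true, ite_false]
        rw [ih t (c :: acc) (by simpa using Nat.le_of_succ_le_succ h)]
        have hcv : (c != v) = true := by simp [bne, Ne.symm hc]
        simp [hcv]

theorem replace_single (l : List Char) (v : Char) :
    PySem.Chars.replace l [v] [] = l.filter (· != v) := by
  have h := go_single v l.length l [] (le_refl _)
  simp only [List.reverse_nil, List.nil_append] at h
  rw [PySem.Chars.replace, if_neg (by simp)]
  exact h

theorem func_spec : Claim_equal_func := by
  intro args_0 _
  unfold Spec_func func func_alt
  have hrep : ∀ (s : String) (v : Char),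
      (PySem.Str.replace s (String.ofList [v]) "").toList = s.toList.filter (· != v) := by
    intro s v
    rw [PySem.Str.toList_replace]
    simpa using replace_single s.toList v
  have hlist : (("aeiouy".toList).foldl
      (fun ret vowel => PySem.Str.replace ret (String.ofList [vowel]) "")
      (PySem.Str.lower args_0)).toList
      = (PySem.Str.lower args_0).toList.filter
          (fun c => !("aeiouy".toList.contains c)) := by
    simp only [show "aeiouy".toList = ['a','e','i','o','u','y'] from rfl,
      List.foldl_cons, List.foldl_nil]
    simp only [hrep, List.filter_filter]
    apply List.filter_congr
    intro c _
    by_cases h1 : c = 'a'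
    · subst h1; decide
    by_cases h2 : c = 'e'
    · subst h2; decide
    by_cases h3 : c = 'i'
    · subst h3; decide
    by_cases h4 : c = 'o'
    · subst h4; decide
    by_cases h5 : c = 'u'
    · subst h5; decide
    by_cases h6 : c = 'y'
    · subst h6; decide
    have e1 : (c == 'a') = false := by simp [h1]
    have e2 : (c == 'e') = false := by simp [h2]
    have e3 : (c == 'i') = false := by simp [h3]
    have e4 : (c == 'o') = false := by simp [h4]
    have e5 : (c == 'u') = false := by simp [h5]
    have e6 : (c == 'y') = false := by simp [h6]
    simp [List.contains, List.elem, e1, e2, e3, e4, e5, e6]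
    exact ⟨h6, h5, h4, h3, h2, h1⟩
  simp only [List.cons.injEq, and_true]
  rw [hlist]
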